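-- pv_equiv track=rewrite | github.com/YINIANnew/L-_-Artificial-Intelligence | LAI/L.py | detect_prompt_injection
-- ===== SOURCE A (Python) =====
-- def detect_prompt_injection(prompt):
--     injection_patterns = [
--         "ignore previous instructions",
--         "system prompt",
--         "override",
--         "bypass",
--         "jailbreak"
--     ]
--
--     for pattern in injection_patterns:
--         if pattern.lower() in prompt.lower():
--             return True
--     return False
-- ===== SOURCE B (Python) =====
-- _PATTERNS = (
--     "ignore previous instructions",
--     "system prompt",
--     "override",
--     "bypass",
--     "jailbreak",
-- )
--
-- def detect_prompt_injection(prompt):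
--     s = prompt.lower()
--     return any(s.startswith(p, i) for i in range(len(s)) for p in _PATTERNS)
-- ===== Notes on version B (the rewrite author's own statement) =====
-- stated objective: alternative
-- what changed: Replaces five separate substring searches (one full scan per pattern, early-return loop) by a single left-to-right scan of the lowered prompt that, at each position, checks whether any pattern is anchored there.
import Mathlib
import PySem

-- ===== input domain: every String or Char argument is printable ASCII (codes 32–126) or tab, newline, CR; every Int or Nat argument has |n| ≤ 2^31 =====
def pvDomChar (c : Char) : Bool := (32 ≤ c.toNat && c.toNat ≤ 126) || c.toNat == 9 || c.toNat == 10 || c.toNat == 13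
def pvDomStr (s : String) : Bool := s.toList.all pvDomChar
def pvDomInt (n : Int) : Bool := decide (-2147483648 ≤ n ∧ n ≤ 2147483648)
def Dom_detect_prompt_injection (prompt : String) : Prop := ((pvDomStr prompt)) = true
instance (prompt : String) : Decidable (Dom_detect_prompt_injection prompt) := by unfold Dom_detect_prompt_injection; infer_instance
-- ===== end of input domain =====

-- B replaces A's five sequential substring searches by one left-to-right scan of the
-- lowered prompt checking each pattern anchored at every position (alternative decomposition, same cost).

-- ===== PORT A =====
-- A's literal pattern list
def pvPatternsA : List String :=
  ["ignore previous instructions", "system prompt", "override", "bypass", "jailbreak"]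

-- A's for-loop with early return: if pattern.lower() in prompt.lower(): return True
def pvLoopA (prompt : String) : List String → Bool
  | [] => false
  | p :: rest =>
      if PySem.Str.isIn (PySem.Str.lower p) (PySem.Str.lower prompt) then true
      else pvLoopA prompt rest

def detect_prompt_injection (prompt : String) : Bool :=
  pvLoopA prompt pvPatternsA

-- ===== PORT B =====
def pvPatternsB : List String :=
  ["ignore previous instructions", "system prompt", "override", "bypass", "jailbreak"]

-- s = prompt.lower(); any(s.startswith(p, i) for i in range(len(s)) for p in _PATTERNS)
def detect_prompt_injection_alt (prompt : String) : Bool :=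
  let s := PySem.Chars.lower prompt.toList
  (List.range s.length).any (fun i =>
    pvPatternsB.any (fun p => PySem.Chars.startswith (s.drop i) p.toList))

-- ===== PRECONDITION & SPEC =====
def Spec_detect_prompt_injection (prompt : String) (out : Bool) : Prop := out = detect_prompt_injection_alt prompt
instance (prompt : String) (out : Bool) : Decidable (Spec_detect_prompt_injection prompt out) := by unfold Spec_detect_prompt_injection; infer_instance

-- ===== CLAIM (what is proved, stated in full; the proofs are below) =====
def Claim_equal_detect_prompt_injection : Prop := ∀ (prompt : String), Dom_detect_prompt_injection prompt → Spec_detect_prompt_injection prompt (detect_prompt_injection prompt)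

-- ===== LEMMAS AND PROOFS =====

-- A's early-return loop is a boolean "any" over the pattern list
theorem pvLoopA_eq_any (prompt : String) (L : List String) :
    pvLoopA prompt L
      = L.any (fun p => PySem.Str.isIn (PySem.Str.lower p) (PySem.Str.lower prompt)) := by
  induction L with
  | nil => rfl
  | cons p rest ih =>
      simp only [pvLoopA, List.any_cons]
      split_ifs with h
      · simp only [h, Bool.true_or]
      · simp only [Bool.not_eq_true] at h
        simp only [h, Bool.false_or, ih]

-- B's anchored scan over all positions finds a nonempty needle iff Python's "in" does
theorem pvScan_iff_isIn (sub s : List Char) (h : sub ≠ []) :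
    (∃ i, i < s.length ∧ PySem.Chars.startswith (s.drop i) sub = true)
      ↔ PySem.Chars.isIn sub s = true := by
  rw [← PySem.Chars.exists_prefix_drop_iff_isIn]
  simp only [PySem.Chars.startswith_iff]
  constructor
  · rintro ⟨i, _, hp⟩; exact ⟨i, hp⟩
  · rintro ⟨j, hp⟩
    have hsub : sub.length ≤ (s.drop j).length := hp.length_le
    have hpos : 0 < sub.length := List.length_pos_iff.mpr h
    have hj : j < s.length := by simp [List.length_drop] at hsub; omega
    exact ⟨j, hj, hp⟩

theorem detect_prompt_injection_eq (prompt : String) :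
    detect_prompt_injection prompt = detect_prompt_injection_alt prompt := by
  unfold detect_prompt_injection detect_prompt_injection_alt
  rw [pvLoopA_eq_any, Bool.eq_iff_iff]
  have e1 : PySem.Chars.lower "ignore previous instructions".toList
      = "ignore previous instructions".toList := by decide
  have e2 : PySem.Chars.lower "system prompt".toList = "system prompt".toList := by decide
  have e3 : PySem.Chars.lower "override".toList = "override".toList := by decide
  have e4 : PySem.Chars.lower "bypass".toList = "bypass".toList := by decide
  have e5 : PySem.Chars.lower "jailbreak".toList = "jailbreak".toList := by decide
  simp only [pvPatternsA, pvPatternsB, List.any_cons, List.any_nil, Bool.or_false,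
    Bool.or_eq_true, List.any_eq_true, List.mem_range, PySem.Str.isIn_eq,
    PySem.Str.toList_lower, e1, e2, e3, e4, e5]
  set s := PySem.Chars.lower prompt.toList with hs
  constructor
  · rintro (h | h | h | h | h)
    · obtain ⟨i, hi, hp⟩ := (pvScan_iff_isIn _ s (by decide)).mpr h
      exact ⟨i, hi, Or.inl hp⟩
    · obtain ⟨i, hi, hp⟩ := (pvScan_iff_isIn _ s (by decide)).mpr h
      exact ⟨i, hi, Or.inr (Or.inl hp)⟩
    · obtain ⟨i, hi, hp⟩ := (pvScan_iff_isIn _ s (by decide)).mpr h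
      exact ⟨i, hi, Or.inr (Or.inr (Or.inl hp))⟩
    · obtain ⟨i, hi, hp⟩ := (pvScan_iff_isIn _ s (by decide)).mpr h
      exact ⟨i, hi, Or.inr (Or.inr (Or.inr (Or.inl hp)))⟩
    · obtain ⟨i, hi, hp⟩ := (pvScan_iff_isIn _ s (by decide)).mpr h
      exact ⟨i, hi, Or.inr (Or.inr (Or.inr (Or.inr hp)))⟩
  · rintro ⟨i, hi, h | h | h | h | h⟩
    · exact Or.inl ((pvScan_iff_isIn _ s (by decide)).mp ⟨i, hi, h⟩)
    · exact Or.inr (Or.inl ((pvScan_iff_isIn _ s (by decide)).mp ⟨i, hi, h⟩))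
    · exact Or.inr (Or.inr (Or.inl ((pvScan_iff_isIn _ s (by decide)).mp ⟨i, hi, h⟩)))
    · exact Or.inr (Or.inr (Or.inr (Or.inl ((pvScan_iff_isIn _ s (by decide)).mp ⟨i, hi, h⟩))))
    · exact Or.inr (Or.inr (Or.inr (Or.inr ((pvScan_iff_isIn _ s (by decide)).mp ⟨i, hi, h⟩))))

-- ===== VERDICT (by name: the statement is the Claim_ definition above) =====
theorem detect_prompt_injection_spec : Claim_equal_detect_prompt_injection := by
  intro prompt _
  unfold Spec_detect_prompt_injection
  exact detect_prompt_injection_eq prompt
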